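-- pv_equiv track=rewrite | github.com/pnw-engineering/KidzConnect | generate_puzzles.py | is_word_in_any_category
-- ===== SOURCE A (Python) =====
-- from typing import List
--
-- def is_word_in_any_category(word: str, bank: dict, exclude_cats: List[str] = None) -> bool:
--     """Check if a word appears in any category (except excluded ones)."""
--     word = word.lower()
--     for cat, words in bank.items():
--         if exclude_cats and cat in exclude_cats:
--             continue
--         if word in [w.lower() for w in words]:
--             return True
--     return False
-- ===== SOURCE B (Python) =====
-- def is_word_in_any_category(word, bank, exclude_cats=None):
--     """Check if a word appears in any category (except excluded ones)."""
--     index = {}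
--     for cat, words in bank.items():
--         for w in words:
--             index.setdefault(w.lower(), set()).add(cat)
--     cats = index.get(word.lower(), set())
--     if exclude_cats:
--         cats = cats - set(exclude_cats)
--     return bool(cats)
-- ===== Notes on version B (the rewrite author's own statement) =====
-- stated objective: alternative
-- what changed: B inverts the data: it builds an index from each lowered word to the set of categories containing it, looks the query word up once, subtracts the excluded categories as a set difference, and returns whether any category remains - replacing A's category-by-category scan with an early return.
import Mathlib
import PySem

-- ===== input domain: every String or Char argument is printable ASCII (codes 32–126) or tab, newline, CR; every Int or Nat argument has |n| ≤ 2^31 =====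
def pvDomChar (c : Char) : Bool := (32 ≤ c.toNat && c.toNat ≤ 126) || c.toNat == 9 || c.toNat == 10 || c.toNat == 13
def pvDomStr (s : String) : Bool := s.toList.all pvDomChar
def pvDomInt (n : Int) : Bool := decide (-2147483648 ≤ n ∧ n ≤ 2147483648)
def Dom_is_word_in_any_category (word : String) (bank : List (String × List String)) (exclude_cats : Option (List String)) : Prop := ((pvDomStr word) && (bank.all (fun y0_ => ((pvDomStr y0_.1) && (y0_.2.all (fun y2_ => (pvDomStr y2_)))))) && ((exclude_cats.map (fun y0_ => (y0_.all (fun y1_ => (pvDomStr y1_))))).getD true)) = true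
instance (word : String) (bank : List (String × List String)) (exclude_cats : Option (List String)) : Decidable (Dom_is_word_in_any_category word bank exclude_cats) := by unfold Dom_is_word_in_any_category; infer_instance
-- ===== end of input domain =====

-- B inverts the data: it builds an index lowered-word -> set of categories, looks the
-- query word up once, subtracts the excluded categories as a set difference and tests
-- non-emptiness, instead of A's per-category scan with early return (objective: alternative).

-- ===== PORT A =====
-- 'exclude_cats and cat in exclude_cats': falsy None/[] means no exclusion
def pvExcluded (exclude_cats : Option (List String)) (cat : String) : Bool :=
  match exclude_cats with
  | none => false
  | some ex => !ex.isEmpty && ex.contains cat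

-- the for-loop of A with its early 'return True'
def pvAGo (w : String) (exclude_cats : Option (List String)) :
    List (String × List String) → Bool
  | [] => false
  | (cat, words) :: rest =>
    if pvExcluded exclude_cats cat then pvAGo w exclude_cats rest
    else if (words.map PySem.Str.lower).contains w then true
    else pvAGo w exclude_cats rest

def is_word_in_any_category (word : String) (bank : List (String × List String)) (exclude_cats : Option (List String)) : Bool :=
  pvAGo (PySem.Str.lower word) exclude_cats bank

-- ===== PORT B =====
-- index.setdefault(w.lower(), set()).add(cat)  ==  d[k] = d.get(k, set()) | {cat}  ==  Dict.modify
def pvIndex (bank : List (String × List String)) : PySem.Dict String (PySem.Set String) :=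
  bank.foldl
    (fun d p => p.2.foldl
      (fun d w => PySem.Dict.modify d (PySem.Str.lower w) PySem.Set.empty
        (fun s => PySem.Set.add s p.1)) d)
    PySem.Dict.empty

def is_word_in_any_category_alt (word : String) (bank : List (String × List String)) (exclude_cats : Option (List String)) : Bool :=
  let cats0 : PySem.Set String :=
    PySem.Dict.getD (pvIndex bank) (PySem.Str.lower word) PySem.Set.empty
  let cats : PySem.Set String :=
    match exclude_cats with
    | none => cats0
    | some ex => if ex.isEmpty then cats0 else PySem.Set.diff cats0 (PySem.Set.ofList ex)
  !cats.isEmpty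

-- ===== PRECONDITION & SPEC =====
def Spec_is_word_in_any_category (word : String) (bank : List (String × List String)) (exclude_cats : Option (List String)) (out : Bool) : Prop := out = is_word_in_any_category_alt word bank exclude_cats
instance (word : String) (bank : List (String × List String)) (exclude_cats : Option (List String)) (out : Bool) : Decidable (Spec_is_word_in_any_category word bank exclude_cats out) := by unfold Spec_is_word_in_any_category; infer_instance

-- ===== CLAIM (what is proved, stated in full; the proofs are below) =====
def Claim_equal_is_word_in_any_category : Prop := ∀ (word : String) (bank : List (String × List String)) (exclude_cats : Option (List String)), Dom_is_word_in_any_category word bank exclude_cats → Spec_is_word_in_any_category word bank exclude_cats (is_word_in_any_category word bank exclude_cats)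

-- ===== LEMMAS AND PROOFS =====
lemma pvAGo_eq_decide (w : String) (ex : Option (List String)) (bank : List (String × List String)) :
    pvAGo w ex bank
      = decide (∃ p ∈ bank, pvExcluded ex p.1 = false ∧ w ∈ p.2.map PySem.Str.lower) := by
  induction bank with
  | nil => simp [pvAGo]
  | cons hd tl ih =>
    obtain ⟨cat, words⟩ := hd
    by_cases hx : pvExcluded ex cat
    · simp [pvAGo, hx, ih]
    · by_cases hm : w ∈ words.map PySem.Str.lower
      · simp [pvAGo, hx, hm]
        exact Or.inl (by simpa using hm)
      · simp [pvAGo, hx, hm, ih]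
        intro x hxmem hlw
        exact absurd (List.mem_map.mpr ⟨x, hxmem, hlw⟩) hm

-- one category's inner loop of pvIndex
lemma mem_getD_inner (cat : String) (ws : List String) (d : PySem.Dict String (PySem.Set String))
    (lw c : String) :
    c ∈ PySem.Dict.getD
          (ws.foldl (fun d w => PySem.Dict.modify d (PySem.Str.lower w) PySem.Set.empty
            (fun s => PySem.Set.add s cat)) d)
          lw PySem.Set.empty
      ↔ c ∈ PySem.Dict.getD d lw PySem.Set.empty ∨ (c = cat ∧ lw ∈ ws.map PySem.Str.lower) := by
  induction ws generalizing d with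
  | nil => simp
  | cons w rest ih =>
    simp only [List.foldl_cons, ih, PySem.Dict.getD_modify]
    by_cases h : lw = PySem.Str.lower w
    · subst h
      simp [PySem.Set.mem_add]
      tauto
    · simp [h]

lemma mem_getD_index_aux (bank : List (String × List String))
    (d : PySem.Dict String (PySem.Set String)) (lw c : String) :
    c ∈ PySem.Dict.getD
          (bank.foldl (fun d p => p.2.foldl
            (fun d w => PySem.Dict.modify d (PySem.Str.lower w) PySem.Set.empty
              (fun s => PySem.Set.add s p.1)) d) d)
          lw PySem.Set.empty
      ↔ c ∈ PySem.Dict.getD d lw PySem.Set.empty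
        ∨ ∃ p ∈ bank, p.1 = c ∧ lw ∈ p.2.map PySem.Str.lower := by
  induction bank generalizing d with
  | nil => simp
  | cons p rest ih =>
    simp only [List.foldl_cons, ih, mem_getD_inner]
    constructor
    · rintro ((hc | ⟨hc, hm⟩) | ⟨q, hq, h1, h2⟩)
      · exact Or.inl hc
      · exact Or.inr ⟨p, by simp, hc.symm, hm⟩
      · exact Or.inr ⟨q, by simp [hq], h1, h2⟩
    · rintro (hc | ⟨q, hq, h1, h2⟩)
      · exact Or.inl (Or.inl hc)
      · rcases List.mem_cons.mp hq with h | h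
        · subst h; exact Or.inl (Or.inr ⟨h1.symm, h2⟩)
        · exact Or.inr ⟨q, h, h1, h2⟩

lemma mem_getD_index (bank : List (String × List String)) (lw c : String) :
    c ∈ PySem.Dict.getD (pvIndex bank) lw PySem.Set.empty
      ↔ ∃ p ∈ bank, p.1 = c ∧ lw ∈ p.2.map PySem.Str.lower := by
  simpa [pvIndex] using mem_getD_index_aux bank PySem.Dict.empty lw c

lemma alt_eq_decide (w : String) (ex : Option (List String)) (bank : List (String × List String)) :
    is_word_in_any_category_alt w bank ex
      = decide (∃ p ∈ bank, pvExcluded ex p.1 = false ∧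
          PySem.Str.lower w ∈ p.2.map PySem.Str.lower) := by
  simp only [is_word_in_any_category_alt]
  rw [Bool.eq_iff_iff]
  simp only [Bool.not_eq_true', List.isEmpty_eq_false_iff_exists_mem, decide_eq_true_iff]
  cases ex with
  | none =>
    simp only [pvExcluded]
    constructor
    · rintro ⟨c, hc⟩
      obtain ⟨p, hp, _, hm⟩ := (mem_getD_index bank _ c).mp hc
      exact ⟨p, hp, by simp, hm⟩
    · rintro ⟨p, hp, _, hm⟩
      exact ⟨p.1, (mem_getD_index bank _ p.1).mpr ⟨p, hp, rfl, hm⟩⟩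
  | some l =>
    cases l with
    | nil =>
      simp only [List.isEmpty_nil, if_true, pvExcluded, Bool.not_true, Bool.false_and]
      constructor
      · rintro ⟨c, hc⟩
        obtain ⟨p, hp, _, hm⟩ := (mem_getD_index bank _ c).mp hc
        exact ⟨p, hp, by simp, hm⟩
      · rintro ⟨p, hp, _, hm⟩
        exact ⟨p.1, (mem_getD_index bank _ p.1).mpr ⟨p, hp, rfl, hm⟩⟩
    | cons a as =>
      simp only [List.isEmpty_cons, if_false, pvExcluded, Bool.not_false, Bool.true_and,
        Bool.false_eq_true, PySem.Set.mem_diff, PySem.Set.mem_ofList]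
      constructor
      · rintro ⟨c, hc1, hc2⟩
        obtain ⟨p, hp, hpc, hm⟩ := (mem_getD_index bank _ c).mp hc1
        refine ⟨p, hp, ?_, hm⟩
        rw [hpc]
        simp only [List.contains_eq_mem, List.mem_cons] at hc2 ⊢
        exact decide_eq_false (by tauto)
      · rintro ⟨p, hp, hxf, hm⟩
        refine ⟨p.1, (mem_getD_index bank _ p.1).mpr ⟨p, hp, rfl, hm⟩, ?_⟩
        simpa using hxf

-- ===== VERDICT (by name: the statement is the Claim_ definition above) =====
theorem is_word_in_any_category_spec : Claim_equal_is_word_in_any_category := by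
  intro word bank exclude_cats _
  unfold Spec_is_word_in_any_category is_word_in_any_category
  rw [pvAGo_eq_decide, alt_eq_decide]
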